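-- pv_equiv track=rewrite | github.com/nghiatt90/cs-practice | codelearn/playfulvowel.py | playfulVowel
-- ===== SOURCE A (Python) =====
-- def playfulVowel(s):
--     s = s.lower()
--     def is_vowel(c):
--         return c in 'aiueo'
--     def is_consonant(c):
--         return c.isalpha() and not is_vowel(c)
--     vowels = 'aiueo'
--     return sum(is_vowel(s[i]) and is_consonant(s[i-1]) and is_consonant(s[i+1]) for i in range(1, len(s)-1))
-- ===== SOURCE B (Python) =====
-- def playfulVowel(s):
--     def cls(c):
--         if c in 'aiueo':
--             return 1
--         if c.isalpha():
--             return 2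
--         return 0
--     cs = [cls(c) for c in s.lower()]
--     # run-length encode the class sequence
--     runs = []
--     i, n = 0, len(cs)
--     while i < n:
--         j = i + 1
--         while j < n and cs[j] == cs[i]:
--             j += 1
--         runs.append((cs[i], j - i))
--         i = j
--     # a counted vowel is exactly a singleton vowel run flanked by consonant runs
--     return sum(1 for (p, _), (k, m), (q, _) in zip(runs, runs[1:], runs[2:])
--                if p == 2 and k == 1 and m == 1 and q == 2)
-- ===== Notes on version B (the rewrite author's own statement) =====
-- stated objective: alternative
-- what changed: A tests every interior index by recomputing its two neighbours' character classes inside one generator; B first run-length encodes the string's class sequence (vowel/consonant/other) and then counts singleton vowel runs flanked by consonant runs, correct because a counted vowel is exactly a length-1 vowel run between two consonant runs.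
import Mathlib
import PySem

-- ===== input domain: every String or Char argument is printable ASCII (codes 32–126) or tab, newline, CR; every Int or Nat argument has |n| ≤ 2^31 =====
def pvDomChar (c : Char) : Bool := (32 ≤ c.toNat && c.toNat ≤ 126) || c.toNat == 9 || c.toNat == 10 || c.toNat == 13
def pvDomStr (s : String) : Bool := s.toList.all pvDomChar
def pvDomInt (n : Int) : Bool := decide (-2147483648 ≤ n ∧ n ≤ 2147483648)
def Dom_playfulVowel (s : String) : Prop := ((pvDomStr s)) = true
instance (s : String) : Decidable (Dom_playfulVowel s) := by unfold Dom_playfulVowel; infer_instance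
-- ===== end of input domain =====

-- B replaces A's per-index neighbour test by a different algorithm: run-length encode
-- the class sequence, then count singleton vowel runs flanked by consonant runs.

-- ===== PORT A =====
def pvA_isVowel (c : Char) : Bool := "aiueo".toList.contains c  -- c in 'aiueo' (single char)

def pvA_isConsonant (c : Char) : Bool := PySem.Chars.isalpha c && !pvA_isVowel c

def playfulVowel (s : String) : Int :=
  let t := PySem.Chars.lower s.toList
  ((PySem.List.pyRange 1 ((t.length : Int) - 1) 1).map (fun i =>
      if pvA_isVowel (PySem.List.pyGetD t i ' ') &&
         pvA_isConsonant (PySem.List.pyGetD t (i - 1) ' ') &&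
         pvA_isConsonant (PySem.List.pyGetD t (i + 1) ' ') then (1 : Int) else 0)).sum

-- ===== PORT B =====
-- B's cls: 1 = vowel, 2 = consonant (other alpha), 0 = non-alphabetic
def pvCls (c : Char) : Nat :=
  if "aiueo".toList.contains c then 1
  else if PySem.Chars.isalpha c then 2
  else 0

-- Source B's run-length-encoding loop: the inner while scanning the current run is the
-- takeWhile/dropWhile split of the remaining list
def pvRle : List Nat → List (Nat × Nat)
  | [] => []
  | k :: rest =>
      (k, (rest.takeWhile (· == k)).length + 1) :: pvRle (rest.dropWhile (· == k))
  termination_by l => l.length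
  decreasing_by
    simp only [List.length_cons]
    exact Nat.lt_succ_of_le (List.length_dropWhile_le _ _)

def playfulVowel_alt (s : String) : Int :=
  let cs := (PySem.Chars.lower s.toList).map pvCls
  let runs := pvRle cs
  (((runs.zip (runs.drop 1)).zip (runs.drop 2)).countP
      (fun x => x.1.1.1 == 2 && x.1.2.1 == 1 && x.1.2.2 == 1 && x.2.1 == 2) : Int)

-- ===== PRECONDITION & SPEC =====
def Spec_playfulVowel (s : String) (out : Int) : Prop := out = playfulVowel_alt s
instance (s : String) (out : Int) : Decidable (Spec_playfulVowel s out) := by unfold Spec_playfulVowel; infer_instance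

-- ===== CLAIM (what is proved, stated in full; the proofs are below) =====
def Claim_equal_playfulVowel : Prop := ∀ (s : String), Dom_playfulVowel s → Spec_playfulVowel s (playfulVowel s)

-- ===== LEMMAS AND PROOFS =====

/-- reference count of consonant-vowel-consonant windows over the raw characters -/
def pvTriple : List Char → Int
  | a :: b :: c :: rest =>
      (if pvA_isVowel b && pvA_isConsonant a && pvA_isConsonant c then (1 : Int) else 0)
        + pvTriple (b :: c :: rest)
  | _ => 0
  termination_by l => l.length

/-- window count over the class list, with the class of the previous character as context -/
def pvGW : Nat → List Nat → Int
  | p, b :: c :: rest => (if p = 2 ∧ b = 1 ∧ c = 2 then 1 else 0) + pvGW b (c :: rest)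
  | _, _ => 0
  termination_by _ l => l.length

/-- class of the first run of a run list (0 if none) -/
def pvHdR : List (Nat × Nat) → Nat
  | (q, _) :: _ => q
  | [] => 0

/-- class of the first element of a class list (0 if none) -/
def pvHdC : List Nat → Nat
  | q :: _ => q
  | [] => 0

/-- flanked-singleton-vowel-run count, with the class of the previous run as context -/
def pvGR : Nat → List (Nat × Nat) → Int
  | p, (k, m) :: rest =>
      (if p = 2 ∧ k = 1 ∧ m = 1 ∧ pvHdR rest = 2 then 1 else 0) + pvGR k rest
  | _, [] => 0
  termination_by _ l => l.length

theorem pvA_core (l : List Char) :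
    ((List.range (l.length - 2)).map (fun k =>
        if pvA_isVowel (l.getD (k + 1) ' ') &&
           pvA_isConsonant (l.getD k ' ') &&
           pvA_isConsonant (l.getD (k + 2) ' ') then (1 : Int) else 0)).sum
      = pvTriple l := by
  induction l with
  | nil => simp [pvTriple]
  | cons a ts ih =>
    cases ts with
    | nil => simp [pvTriple]
    | cons b us =>
      cases us with
      | nil => simp [pvTriple]
      | cons c vs =>
        have hlen : (a :: b :: c :: vs).length - 2 = vs.length + 1 := by simp
        rw [hlen, List.range_succ_eq_map, List.map_cons, List.map_map, List.sum_cons, pvTriple]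
        have h2 : (b :: c :: vs).length - 2 = vs.length := by simp
        rw [h2] at ih
        rw [← ih]
        congr 1

theorem pvA_eq_triple (l : List Char) :
    ((PySem.List.pyRange 1 ((l.length : Int) - 1) 1).map (fun i =>
        if pvA_isVowel (PySem.List.pyGetD l i ' ') &&
           pvA_isConsonant (PySem.List.pyGetD l (i - 1) ' ') &&
           pvA_isConsonant (PySem.List.pyGetD l (i + 1) ' ') then (1 : Int) else 0)).sum
      = pvTriple l := by
  rw [PySem.List.pyRange_one, List.map_map, ← pvA_core l]
  have hlen : ((l.length : Int) - 1 - 1).toNat = l.length - 2 := by omega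
  rw [hlen]
  apply congrArg
  apply List.map_congr_left
  intro k _
  have e1 : (1 : Int) + (k : Int) = ((k + 1 : Nat) : Int) := by push_cast; ring
  have e2 : ((k + 1 : Nat) : Int) - 1 = ((k : Nat) : Int) := by push_cast; ring
  have e3 : ((k + 1 : Nat) : Int) + 1 = ((k + 2 : Nat) : Int) := by push_cast; ring
  simp only [Function.comp, e1, e2, e3, PySem.List.pyGetD_natCast]

theorem pvCls_eq_one (c : Char) : (pvCls c = 1) ↔ pvA_isVowel c = true := by
  simp only [pvCls, pvA_isVowel]
  split_ifs with h1 h2 <;> simp_all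

theorem pvCls_eq_two (c : Char) : (pvCls c = 2) ↔ pvA_isConsonant c = true := by
  simp only [pvCls, pvA_isConsonant, pvA_isVowel]
  split_ifs with h1 h2 <;> simp_all

/-- pvTriple over characters is pvGW over the mapped class list -/
theorem pvTriple_eq_gw (l : List Char) (a : Char) :
    pvGW (pvCls a) (l.map pvCls) = pvTriple (a :: l) := by
  induction l generalizing a with
  | nil => simp [pvGW, pvTriple]
  | cons b t ih =>
    cases t with
    | nil => simp [pvGW, pvTriple]
    | cons c rest =>
      simp only [List.map_cons]
      rw [pvGW, pvTriple, ← List.map_cons, ih b]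
      congr 1
      have hc : (pvCls a = 2 ∧ pvCls b = 1 ∧ pvCls c = 2)
          ↔ ((pvA_isVowel b && pvA_isConsonant a && pvA_isConsonant c) = true) := by
        simp only [pvCls_eq_one, pvCls_eq_two, Bool.and_eq_true]
        tauto
      simp only [hc]

/-- peeling one whole run off the window count -/
theorem pvGW_replicate (m : Nat) (k p : Nat) (rest : List Nat) :
    pvGW p (List.replicate (m + 1) k ++ rest)
      = (if p = 2 ∧ k = 1 ∧ m = 0 ∧ pvHdC rest = 2 then 1 else 0) + pvGW k rest := by
  induction m generalizing p with
  | zero =>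
    cases rest with
    | nil => simp [pvGW, pvHdC]
    | cons q r => simp [pvGW, pvHdC]
  | succ m ih =>
    have hrep : List.replicate (m + 1 + 1) k ++ rest
        = k :: (List.replicate (m + 1) k ++ rest) := by
      simp [List.replicate_succ]
    rw [hrep]
    have hcons : List.replicate (m + 1) k ++ rest = k :: (List.replicate m k ++ rest) := by
      simp [List.replicate_succ]
    rw [hcons, pvGW, ← hcons, ih k]
    have h1 : ¬ (p = 2 ∧ k = 1 ∧ k = 2) := by rintro ⟨_, h, h'⟩; omega
    have h2 : ¬ (p = 2 ∧ k = 1 ∧ m + 1 = 0 ∧ pvHdC rest = 2) := by rintro ⟨_, _, h, _⟩; omega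
    have h3 : ¬ (k = 2 ∧ k = 1 ∧ m = 0 ∧ pvHdC rest = 2) := by rintro ⟨h, h', _⟩; omega
    simp [h1, h3]

/-- the run list starts with the class the class list starts with -/
theorem pvHd_rle (l : List Nat) : pvHdR (pvRle l) = pvHdC l := by
  cases l with
  | nil => simp [pvRle, pvHdR, pvHdC]
  | cons k rest => simp [pvRle, pvHdR, pvHdC]

/-- main: window count over the class list = flanked-singleton count over its RLE -/
theorem pvGW_eq_gr (l : List Nat) (p : Nat) : pvGW p l = pvGR p (pvRle l) := by
  induction l using pvRle.induct generalizing p with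
  | case1 => simp [pvGW, pvRle, pvGR]
  | case2 k rest ih =>
    rw [pvRle, pvGR]
    have hdecomp : k :: rest
        = List.replicate ((rest.takeWhile (· == k)).length + 1) k
            ++ rest.dropWhile (· == k) := by
      have htw : rest.takeWhile (· == k) = List.replicate (rest.takeWhile (· == k)).length k := by
        rw [List.eq_replicate_iff]
        refine ⟨rfl, fun b hb => ?_⟩
        have := List.mem_takeWhile_imp hb
        simpa using this
      conv_lhs => rw [← List.takeWhile_append_dropWhile (p := (· == k)) (l := rest)]
      rw [List.replicate_succ]
      simp only [List.cons_append]
      congr 1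
      conv_lhs => rw [htw]
    rw [hdecomp, pvGW_replicate, ih k, pvHd_rle]
    have hiff : ((rest.takeWhile (· == k)).length + 1 = 1)
        ↔ ((rest.takeWhile (· == k)).length = 0) := by omega
    simp only [hiff]

/-- the zipped triple count in B's port equals pvGR with the first run as context -/
theorem pvZip_eq_gr (R : List (Nat × Nat)) (k m : Nat) :
    (((((k, m) :: R).zip (R)).zip (R.drop 1)).countP
        (fun x => x.1.1.1 == 2 && x.1.2.1 == 1 && x.1.2.2 == 1 && x.2.1 == 2) : Int)
      = pvGR k R := by
  induction R generalizing k m with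
  | nil => simp [pvGR]
  | cons b rest ih =>
    obtain ⟨k', m'⟩ := b
    cases rest with
    | nil => simp [pvGR, pvHdR]
    | cons c rest2 =>
      have hd : List.drop 1 ((k', m') :: c :: rest2) = c :: rest2 := rfl
      rw [hd, List.zip_cons_cons, List.zip_cons_cons, List.countP_cons, pvGR]
      push_cast
      rw [← ih k' m']
      have hd2 : List.drop 1 (c :: rest2) = rest2 := rfl
      rw [hd2]
      have hiff : ((fun (x : ((Nat × Nat) × Nat × Nat) × Nat × Nat) =>
            x.1.1.1 == 2 && x.1.2.1 == 1 && x.1.2.2 == 1 && x.2.1 == 2)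
              (((k, m), (k', m')), c) = true)
          ↔ (k = 2 ∧ k' = 1 ∧ m' = 1 ∧ pvHdR (c :: rest2) = 2) := by
        simp [pvHdR, and_assoc]
      by_cases h : (k = 2 ∧ k' = 1 ∧ m' = 1 ∧ pvHdR (c :: rest2) = 2)
      · rw [if_pos (hiff.mpr h), if_pos h]; ring
      · rw [if_neg (fun hh => h (hiff.mp hh)), if_neg h]; ring

/-- zipped triple count = pvGR with sentinel previous class 0 -/
theorem pvZip0 (R : List (Nat × Nat)) :
    (((R.zip (R.drop 1)).zip (R.drop 2)).countP
        (fun x => x.1.1.1 == 2 && x.1.2.1 == 1 && x.1.2.2 == 1 && x.2.1 == 2) : Int)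
      = pvGR 0 R := by
  cases R with
  | nil => simp [pvGR]
  | cons r rest =>
    obtain ⟨k, m⟩ := r
    have hd1 : List.drop 1 ((k, m) :: rest) = rest := rfl
    have hd2 : List.drop 2 ((k, m) :: rest) = List.drop 1 rest := rfl
    rw [hd1, hd2, pvZip_eq_gr rest k m, pvGR]
    simp

/-- pvGW with sentinel 0 over the class list = pvTriple over the characters -/
theorem pvGW0_eq_triple (t : List Char) : pvGW 0 (t.map pvCls) = pvTriple t := by
  cases t with
  | nil => simp [pvGW, pvTriple]
  | cons a rest =>
    cases rest with
    | nil => simp [pvGW, pvTriple]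
    | cons b r =>
      simp only [List.map_cons]
      rw [pvGW]
      have h : ¬ ((0:Nat) = 2 ∧ pvCls a = 1 ∧ pvCls b = 2) := by rintro ⟨h, _⟩; omega
      rw [if_neg h, ← List.map_cons, pvTriple_eq_gw (b :: r) a, zero_add]

-- ===== VERDICT (by name: the statement is the Claim_ definition above) =====
theorem playfulVowel_spec : Claim_equal_playfulVowel := by
  intro s _
  unfold Spec_playfulVowel playfulVowel playfulVowel_alt
  rw [pvA_eq_triple]
  rw [pvZip0, ← pvGW_eq_gr, pvGW0_eq_triple]
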